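-- pv_equiv track=rewrite | github.com/adf1178/multi-lingual-code-gen | evaluation/vllm-eval.py | remove_code
-- ===== SOURCE A (Python) =====
-- def remove_code(code):
--     lines = code.split('\n')
--     add = False
--     change = False
--     result = []
--     for line in lines:
--         if line.startswith('```'):
--             if add:
--                 break
--             else:
--                 add = True
--                 change = True
--                 continue
--         if add:
--             result.append(line)
--     if not change:
--         return code
--     return '\n'.join(result)
-- ===== SOURCE B (Python) =====
-- def remove_code(code):
--     lines = code.split('\n')
--     fences = [i for i, line in enumerate(lines) if line.startswith('```')]
--     if not fences:
--         return code
--     start = fences[0] + 1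
--     end = fences[1] if len(fences) > 1 else len(lines)
--     return '\n'.join(lines[start:end])
-- ===== Notes on version B (the rewrite author's own statement) =====
-- stated objective: simpler
-- what changed: Replaces A's flag-driven single accumulation loop (add/change booleans, break) by collecting the indices of fence lines once with a comprehension and returning the slice between the first fence and the second fence (or the end).
import Mathlib
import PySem

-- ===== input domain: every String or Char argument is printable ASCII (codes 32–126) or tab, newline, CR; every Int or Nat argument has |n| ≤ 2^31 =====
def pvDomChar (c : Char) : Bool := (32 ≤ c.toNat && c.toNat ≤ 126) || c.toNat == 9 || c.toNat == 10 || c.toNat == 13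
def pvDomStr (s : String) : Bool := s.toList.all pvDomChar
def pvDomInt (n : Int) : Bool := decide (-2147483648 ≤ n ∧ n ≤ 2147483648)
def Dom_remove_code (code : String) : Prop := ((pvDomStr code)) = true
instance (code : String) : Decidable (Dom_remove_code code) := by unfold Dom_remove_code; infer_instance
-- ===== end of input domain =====

-- B replaces A's flag-driven accumulation loop by collecting the fence-line indices once and slicing between the first two (objective: simpler).

-- ===== PORT A =====
def removeLoop (lines : List String) (add change : Bool) (result : List String) :
    Bool × List String :=
  match lines with
  | [] => (change, result)
  | line :: rest =>
    if PySem.Str.startswith line "```" then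
      if add then (change, result)
      else removeLoop rest true true result
    else
      if add then removeLoop rest add change (result ++ [line])
      else removeLoop rest add change result

def remove_code (code : String) : String :=
  -- split? is none only for an empty separator, never here
  let lines := (PySem.Str.split? code "\n").getD []
  let res := removeLoop lines false false []
  if res.1 = false then code else PySem.Str.join "\n" res.2

-- ===== PORT B =====
def remove_code_alt (code : String) : String :=
  -- split? is none only for an empty separator, never here
  let lines := (PySem.Str.split? code "\n").getD []
  let fences := (PySem.List.enumerate lines 0).filterMap
      (fun q => if PySem.Str.startswith q.2 "```" then some q.1 else none)
  match fences with
  | [] => code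
  | [i] => PySem.Str.join "\n" (PySem.List.slice lines (some (i + 1)) (some (lines.length : Int)))
  | i :: j :: _ => PySem.Str.join "\n" (PySem.List.slice lines (some (i + 1)) (some j))

-- ===== PRECONDITION & SPEC =====
def Spec_remove_code (code : String) (out : String) : Prop := out = remove_code_alt code
instance (code : String) (out : String) : Decidable (Spec_remove_code code out) := by unfold Spec_remove_code; infer_instance

-- ===== CLAIM (what is proved, stated in full; the proofs are below) =====
def Claim_equal_remove_code : Prop := ∀ (code : String), Dom_remove_code code → Spec_remove_code code (remove_code code)

-- ===== LEMMAS AND PROOFS =====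

-- fence-index list over Nat indices (proof-side mirror of B's comprehension)
def fenceIdx : List String → List Nat
  | [] => []
  | l :: ls =>
      if PySem.Str.startswith l "```" then 0 :: (fenceIdx ls).map (· + 1)
      else (fenceIdx ls).map (· + 1)

lemma enumerate_filter_eq (ls : List String) (s : Int) :
    (PySem.List.enumerate ls s).filterMap
        (fun q => if PySem.Str.startswith q.2 "```" then some q.1 else none)
      = (fenceIdx ls).map (fun n : Nat => (n : Int) + s) := by
  induction ls generalizing s with
  | nil => simp [PySem.List.enumerate_nil, fenceIdx]
  | cons l ls ih =>
    rw [PySem.List.enumerate_cons, List.filterMap_cons, ih (s + 1)]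
    cases hb : PySem.Str.startswith l "```"
    · have h1 : fenceIdx (l :: ls) = (fenceIdx ls).map (· + 1) := by
        simp only [fenceIdx, hb, Bool.false_eq_true, if_false]
      rw [h1, List.map_map]
      simp only [Bool.false_eq_true, if_false]
      exact List.map_congr_left fun n _ => by simp only [Function.comp_apply]; push_cast; omega
    · have h1 : fenceIdx (l :: ls) = 0 :: (fenceIdx ls).map (· + 1) := by
        simp only [fenceIdx, hb, if_true]
      rw [h1, List.map_cons, List.map_map]
      simp only [if_true]
      refine congrArg₂ List.cons ?_ (List.map_congr_left fun n _ => ?_)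
      · push_cast; omega
      · simp only [Function.comp_apply]; push_cast; omega

lemma removeLoop_run (ls : List String) (acc : List String) :
    removeLoop ls true true acc
      = (true, acc ++ ls.takeWhile (fun l => !PySem.Str.startswith l "```")) := by
  induction ls generalizing acc with
  | nil => simp [removeLoop]
  | cons l ls ih =>
    cases hb : PySem.Str.startswith l "```"
    · simp only [removeLoop, hb, Bool.false_eq_true, if_false, ih,
        List.takeWhile_cons, Bool.not_false, if_true]
      simp
    · simp only [removeLoop, hb, if_true, List.takeWhile_cons, Bool.not_true,
        Bool.false_eq_true, if_false]
      simp

lemma fenceIdx_nil_takeWhile (ls : List String) (h : fenceIdx ls = []) :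
    ls.takeWhile (fun l => !PySem.Str.startswith l "```") = ls := by
  induction ls with
  | nil => rfl
  | cons l ls ih =>
    cases hb : PySem.Str.startswith l "```"
    · simp only [fenceIdx, hb, Bool.false_eq_true, if_false, List.map_eq_nil_iff] at h
      simp only [List.takeWhile_cons, hb, Bool.not_false, if_true, ih h]
    · simp only [fenceIdx, hb, if_true] at h
      exact absurd h (List.cons_ne_nil _ _)

lemma fenceIdx_head_takeWhile (ls : List String) (j : Nat) (r : List Nat)
    (h : fenceIdx ls = j :: r) :
    ls.takeWhile (fun l => !PySem.Str.startswith l "```") = ls.take j := by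
  induction ls generalizing j r with
  | nil => simp [fenceIdx] at h
  | cons l ls ih =>
    cases hb : PySem.Str.startswith l "```"
    · simp only [fenceIdx, hb, Bool.false_eq_true, if_false] at h
      rcases List.map_eq_cons_iff.mp h with ⟨j', r', hG, hj, hr⟩
      subst hj
      simp only [List.takeWhile_cons, hb, Bool.not_false, if_true,
        ih j' r' hG, List.take_succ_cons]
    · simp only [fenceIdx, hb, if_true, List.cons.injEq] at h
      rcases h with ⟨hj, -⟩
      subst hj
      simp only [List.takeWhile_cons, hb, Bool.not_true, Bool.false_eq_true,
        if_false, List.take_zero]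

lemma loop_char (ls : List String) :
    removeLoop ls false false []
      = match fenceIdx ls with
        | [] => (false, [])
        | [i] => (true, ls.drop (i + 1))
        | i :: j :: _ => (true, (ls.drop (i + 1)).take (j - (i + 1))) := by
  induction ls with
  | nil => rfl
  | cons l ls ih =>
    cases hb : PySem.Str.startswith l "```"
    · simp only [removeLoop, hb, Bool.false_eq_true, if_false]
      rw [ih]
      rcases hG : fenceIdx ls with _ | ⟨i, _ | ⟨j, r⟩⟩ <;>
        simp only [hG, fenceIdx, hb, Bool.false_eq_true, if_false, List.map_cons,
          List.map_nil, List.drop_succ_cons, Nat.succ_sub_succ]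
    · simp only [removeLoop, hb, if_true, Bool.false_eq_true, if_false]
      rw [removeLoop_run ls []]
      rcases hG : fenceIdx ls with _ | ⟨j, r⟩
      · rw [fenceIdx_nil_takeWhile ls hG]
        simp only [fenceIdx, hb, if_true, hG, List.map_nil]
        simp
      · rw [fenceIdx_head_takeWhile ls j r hG]
        simp only [fenceIdx, hb, if_true, hG, List.map_cons]
        simp

lemma int_cast_succ (n : Nat) : ((n : Int) + 1) = ((n + 1 : Nat) : Int) := by push_cast; ring

-- ===== VERDICT (by name: the statement is the Claim_ definition above) =====
theorem remove_code_spec : Claim_equal_remove_code := by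
  intro code _
  unfold Spec_remove_code
  simp only [remove_code, remove_code_alt]
  generalize (PySem.Str.split? code "\n").getD [] = ls
  rw [enumerate_filter_eq ls 0, loop_char ls]
  rcases hG : fenceIdx ls with _ | ⟨i, _ | ⟨j, r⟩⟩
  · simp
  · simp only [List.map_cons, List.map_nil, add_zero]
    rw [int_cast_succ i, PySem.List.slice_natCast]
    have htake : (ls.drop (i + 1)).take (ls.length - (i + 1)) = ls.drop (i + 1) := by
      rw [← List.length_drop]; exact List.take_length
    simp [htake]
  · simp only [List.map_cons, add_zero]
    rw [int_cast_succ i, PySem.List.slice_natCast]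
    simp
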